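-- pv_equiv track=rewrite | github.com/DevLuce/Algorithm-Study | 자료구조/prog42579_lsh.py | solution
-- ===== SOURCE A (Python) =====
-- def solution(genres, plays):
--     answer = []
--     genre_total_play = {}
--     total_map = {}
--     for i in range(len(genres)):
--         genre = genres[i]
--         if genre not in genre_total_play:
--             genre_total_play[genre] = 0
--             total_map[genre] = []
--
--         genre_total_play[genre] += plays[i]
--         total_map[genre].append((i, -plays[i]))
--
--     total_play_list = []
--     sorted_genre = []
--     for genre, plays in genre_total_play.items():
--         total_play_list.append((-plays, genre))
--
--     total_play_list.sort(key=lambda x: x[0])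
--
--     for plays, genre in total_play_list:
--         sorted_genre.append(genre)
--
--     for genre in sorted_genre:
--         play_info = total_map[genre]
--
--         play_info.sort(key=lambda x: (x[1], x[0]))
--
--         cnt = 0
--
--         for info in play_info:
--             if cnt == 2: break
--             answer.append(info[0])
--             cnt+= 1
--
--     return answer
-- ===== SOURCE B (Python) =====
-- def solution(genres, plays):
--     # one pass: per genre keep (total, top-2 songs) instead of full lists sorted later
--     info = {}
--     for i, (g, p) in enumerate(zip(genres, plays)):
--         if g not in info:
--             info[g] = (0, [])
--         total, top2 = info[g]
--         j = 0
--         while j < len(top2) and top2[j][1] >= p: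
--             j += 1
--         info[g] = (total + p, (top2[:j] + [(i, p)] + top2[j:])[:2])
--     return [i for _, (_, top2) in sorted(info.items(), key=lambda kv: -kv[1][0])
--             for i, _ in top2]
-- ===== Notes on version B (the rewrite author's own statement) =====
-- stated objective: alternative
-- what changed: Instead of storing every song per genre and sorting each genre's song list (plus keeping two parallel dicts), B makes a single pass over zip(genres, plays) keeping only each genre's running total and its top-2 songs via a constant-size ordered insert, then sorts only the genres by total.
import Mathlib
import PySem

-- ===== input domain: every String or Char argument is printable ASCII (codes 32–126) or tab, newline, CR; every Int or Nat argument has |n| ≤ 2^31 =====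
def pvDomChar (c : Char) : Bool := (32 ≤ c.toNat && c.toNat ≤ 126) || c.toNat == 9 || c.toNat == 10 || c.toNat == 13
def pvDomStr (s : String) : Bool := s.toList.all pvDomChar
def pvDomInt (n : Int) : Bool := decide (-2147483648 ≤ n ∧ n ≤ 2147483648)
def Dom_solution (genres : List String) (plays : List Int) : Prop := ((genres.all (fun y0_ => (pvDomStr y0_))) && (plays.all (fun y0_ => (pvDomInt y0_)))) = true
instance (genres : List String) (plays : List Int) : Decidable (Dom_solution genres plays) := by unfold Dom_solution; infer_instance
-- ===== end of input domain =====

-- B replaces A's per-genre full lists + per-genre sorts by a single pass that keeps only each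
-- genre's running total and its top-2 songs; only the genres themselves are sorted at the end.

-- ===== PORT A =====
-- the inner 'for info in play_info: if cnt == 2: break; answer.append(info[0]); cnt += 1' loop
def takeLoop : List (Int × Int) → Int → List Int → List Int
  | [], _, ans => ans
  | x :: rest, cnt, ans => if cnt == 2 then ans else takeLoop rest (cnt + 1) (ans ++ [x.1])

def solution (genres : List String) (plays : List Int) : List Int :=
  let st := (PySem.List.pyRange 0 (PySem.List.len genres) 1).foldl
    (fun (st : PySem.Dict String Int × PySem.Dict String (List (Int × Int))) i =>
      let genre := PySem.List.pyGetD genres i ""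
      let st := if st.1.contains genre then st else (st.1.insert genre 0, st.2.insert genre [])
      (st.1.modify genre 0 (fun t => t + PySem.List.pyGetD plays i 0),
       st.2.modify genre [] (fun l => l ++ [(i, -(PySem.List.pyGetD plays i 0))])))
    (PySem.Dict.empty, PySem.Dict.empty)
  let total_play_list := st.1.items.foldl (fun acc gt => acc ++ [(-gt.2, gt.1)]) []
  let total_play_list := PySem.List.sorted total_play_list (fun x => x.1)
  let sorted_genre := total_play_list.foldl (fun acc pg => acc ++ [pg.2]) []
  sorted_genre.foldl (fun answer genre =>
      let play_info := PySem.List.sorted2 (st.2.getD genre []) (fun x => x.2) (fun x => x.1)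
      takeLoop play_info 0 answer) []

-- ===== PORT B =====
-- the 'j = 0; while j < len(top2) and top2[j][1] >= p: j += 1' scan plus the slice re-assembly
def altIns (x : Int × Int) : List (Int × Int) → List (Int × Int)
  | [] => [x]
  | y :: ys => if x.2 ≤ y.2 then y :: altIns x ys else x :: y :: ys

def solution_alt (genres : List String) (plays : List Int) : List Int :=
  let info := (PySem.List.enumerate (genres.zip plays)).foldl
    (fun (info : PySem.Dict String (Int × List (Int × Int))) s =>
      let info := if info.contains s.2.1 then info else info.insert s.2.1 (0, [])
      let e := info.getD s.2.1 (0, [])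
      info.insert s.2.1 (e.1 + s.2.2, (altIns (s.1, s.2.2) e.2).take 2))
    PySem.Dict.empty
  (PySem.List.sorted info.items (fun kv => -kv.2.1)).flatMap (fun kv => kv.2.2.map (fun ip => ip.1))

-- ===== PRECONDITION & SPEC =====
-- Pre_ excludes exactly the inputs where plays is shorter than genres: there Python A raises
-- IndexError on plays[i] (B, which zips the two lists, returns the truncated answer instead).
def Pre_solution (genres : List String) (plays : List Int) : Prop :=
  genres.length ≤ plays.length
instance (genres : List String) (plays : List Int) : Decidable (Pre_solution genres plays) := by unfold Pre_solution; infer_instance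

def pvWitness_solution : List String × List Int := (["rock", "pop", "rock"], [100, 200, 50])

def Spec_solution (genres : List String) (plays : List Int) (out : List Int) : Prop := out = solution_alt genres plays
instance (genres : List String) (plays : List Int) (out : List Int) : Decidable (Spec_solution genres plays out) := by unfold Spec_solution; infer_instance

-- ===== CLAIM (what is proved, stated in full; the proofs are below) =====
def Claim_equal_solution : Prop := ∀ (genres : List String) (plays : List Int), Dom_solution genres plays → Pre_solution genres plays → Spec_solution genres plays (solution genres plays)
-- ===== LEMMAS AND PROOFS =====

-- a song record: (genre, (index, play))
def pvStepG (d : PySem.Dict String Int) (s : String × (Int × Int)) : PySem.Dict String Int :=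
  d.modify s.1 0 (fun t => t + s.2.2)
def pvStepT (d : PySem.Dict String (List (Int × Int))) (s : String × (Int × Int)) : PySem.Dict String (List (Int × Int)) :=
  d.modify s.1 [] (fun l => l ++ [(s.2.1, -s.2.2)])
def pvStepB (d : PySem.Dict String (Int × List (Int × Int))) (s : String × (Int × Int)) : PySem.Dict String (Int × List (Int × Int)) :=
  d.modify s.1 (0, []) (fun e => (e.1 + s.2.2, (altIns (s.2.1, s.2.2) e.2).take 2))
def pvNeg (z : Int × Int) : Int × Int := (z.1, -z.2)

lemma takeLoop_two (l : List (Int × Int)) (ans : List Int) : takeLoop l 2 ans = ans := by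
  cases l <;> simp [takeLoop]

lemma takeLoop_zero (l : List (Int × Int)) (ans : List Int) :
    takeLoop l 0 ans = ans ++ (l.take 2).map (fun ip => ip.1) := by
  match l with
  | [] => simp [takeLoop]
  | [x] => simp [takeLoop]
  | x :: y :: r => simp [takeLoop, takeLoop_two]

lemma pvNeg_pvNeg (l : List (Int × Int)) : (l.map pvNeg).map pvNeg = l := by
  induction l with
  | nil => rfl
  | cons x t ih => simp [pvNeg, ih]

lemma insertBy_lex_map (x : Int × Int) (t : List (Int × Int)) (h : ∀ y ∈ t, y.1 < x.1) :
    PySem.List.insertBy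
      (fun a b => decide (a.2 < b.2) || (!decide (b.2 < a.2) && decide (a.1 < b.1)))
      (pvNeg x) (t.map pvNeg) = (altIns x t).map pvNeg := by
  induction t with
  | nil => rfl
  | cons y ys ih =>
    have hy : y.1 < x.1 := h y (by simp)
    by_cases hc : x.2 ≤ y.2
    · have h1 : (decide ((pvNeg x).2 < (pvNeg y).2) ||
          (!decide ((pvNeg y).2 < (pvNeg x).2) && decide ((pvNeg x).1 < (pvNeg y).1))) = false := by
        simp [pvNeg]; omega
      simp only [List.map_cons, PySem.List.insertBy, h1, altIns, if_pos hc, Bool.false_eq_true,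
        if_false, List.map_cons]
      rw [ih (fun z hz => h z (by simp [hz]))]
    · have h1 : (decide ((pvNeg x).2 < (pvNeg y).2) ||
          (!decide ((pvNeg y).2 < (pvNeg x).2) && decide ((pvNeg x).1 < (pvNeg y).1))) = true := by
        simp [pvNeg]; omega
      simp [PySem.List.insertBy, h1, altIns, hc]

lemma take_two_insertBy (b : (Int × Int) → (Int × Int) → Bool) (e : Int × Int) (l : List (Int × Int)) :
    (PySem.List.insertBy b e l).take 2 = (PySem.List.insertBy b e (l.take 2)).take 2 := by
  match l with
  | [] => rfl
  | [a] => rfl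
  | a :: c :: rest =>
    simp only [PySem.List.insertBy, List.take]
    by_cases h1 : b e a = true
    · simp [h1]
    · simp only [h1, Bool.false_eq_true, if_false]
      by_cases h2 : b e c = true <;> simp [h2]

lemma sorted2_snoc (l : List (Int × Int)) (e : Int × Int) :
    PySem.List.sorted2 (l ++ [e]) (fun x => x.2) (fun x => x.1) =
      PySem.List.insertBy
        (fun a b => decide (a.2 < b.2) || (!decide (b.2 < a.2) && decide (a.1 < b.1)))
        e (PySem.List.sorted2 l (fun x => x.2) (fun x => x.1)) := by
  simp [PySem.List.sorted2, List.foldl_append]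

lemma pvNeg_pvNeg_elem (a : Int × Int) : pvNeg (pvNeg a) = a := by simp [pvNeg]

lemma top2_core (ps : List (Int × Int)) (h : ps.Pairwise (fun a b => a.1 < b.1)) :
    ps.foldl (fun t x => (altIns x t).take 2) [] =
      ((PySem.List.sorted2 (ps.map pvNeg) (fun x => x.2) (fun x => x.1)).take 2).map pvNeg := by
  induction ps using List.reverseRecOn with
  | nil => rfl
  | append_singleton l x ih =>
    obtain ⟨hl, -, hlast⟩ := List.pairwise_append.mp h
    have IH := ih hl
    have hmem : ∀ y ∈ ((PySem.List.sorted2 (l.map pvNeg) (fun x => x.2) (fun x => x.1)).take 2).map pvNeg,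
        y.1 < x.1 := by
      intro y hy
      obtain ⟨z, hz, rfl⟩ := List.mem_map.mp hy
      have hz3 : z ∈ l.map pvNeg :=
        (PySem.List.sorted2_perm _ _ _ _).mem_iff.mp (List.take_subset _ _ hz)
      obtain ⟨a, ha, rfl⟩ := List.mem_map.mp hz3
      rw [pvNeg_pvNeg_elem]
      exact hlast a ha x (by simp)
    rw [List.foldl_append, List.foldl_cons, List.foldl_nil, IH, List.map_append]
    rw [show (List.map pvNeg [x]) = [pvNeg x] from rfl, sorted2_snoc, take_two_insertBy]
    have e1 : (PySem.List.sorted2 (l.map pvNeg) (fun x => x.2) (fun x => x.1)).take 2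
        = (((PySem.List.sorted2 (l.map pvNeg) (fun x => x.2) (fun x => x.1)).take 2).map pvNeg).map pvNeg := by
      rw [pvNeg_pvNeg]
    conv_rhs => rw [e1, insertBy_lex_map x _ hmem, ← List.map_take, pvNeg_pvNeg]

lemma getD_foldl_modify_gen {ν σ : Type} (S : List σ) (k : σ → String) (d0 : ν) (F : σ → ν → ν)
    (d : PySem.Dict String ν) (g : String) :
    (S.foldl (fun d s => d.modify (k s) d0 (F s)) d).getD g d0 =
      (S.filter (fun s => k s == g)).foldl (fun v s => F s v) (d.getD g d0) := by
  induction S generalizing d with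
  | nil => simp
  | cons s S ih =>
    simp only [List.foldl_cons, List.filter_cons, ih]
    by_cases hc : k s = g
    · have hm : (d.modify (k s) d0 (F s)).getD g d0 = F s (d.getD g d0) := by
        simp [PySem.Dict.modify, hc]
      simp [hc]
    · have hbe : (k s == g) = false := by simp [hc]
      have hm : (d.modify (k s) d0 (F s)).getD g d0 = d.getD g d0 := by
        simp only [PySem.Dict.modify, PySem.Dict.getD_insert]
        rw [if_neg (fun h => hc h.symm)]
      simp [hbe, hm]

lemma insertBy_map {α β : Type} (f : α → β) (b : α → α → Bool) (b' : β → β → Bool)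
    (hb : ∀ x y, b' (f x) (f y) = b x y) (x : α) (l : List α) :
    PySem.List.insertBy b' (f x) (l.map f) = (PySem.List.insertBy b x l).map f := by
  induction l with
  | nil => rfl
  | cons y ys ih => simp only [List.map_cons, PySem.List.insertBy, hb, ih]; split <;> simp

lemma foldl_insertBy_map {α β : Type} (f : α → β) (b : α → α → Bool) (b' : β → β → Bool)
    (hb : ∀ x y, b' (f x) (f y) = b x y) (l : List α) (acc : List α) :
    l.foldl (fun acc a => PySem.List.insertBy b' (f a) acc) (acc.map f) =
      (l.foldl (fun acc a => PySem.List.insertBy b a acc) acc).map f := by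
  induction l generalizing acc with
  | nil => rfl
  | cons x t ih => simp only [List.foldl_cons, insertBy_map f b b' hb, ih]

lemma sorted_map_key {α β : Type} (l : List α) (f : α → β) (kb : β → Int) :
    PySem.List.sorted (l.map f) kb = (PySem.List.sorted l (fun a => kb (f a))).map f := by
  rw [PySem.List.sorted_eq_foldl_insertBy, PySem.List.sorted_eq_foldl_insertBy, List.foldl_map]
  exact foldl_insertBy_map f _ _ (fun x y => rfl) l []

lemma A_keys (gtp : PySem.Dict String Int) (tm : PySem.Dict String (List (Int × Int)))
    (s : String × (Int × Int)) (hk : gtp.keys = tm.keys) :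
    (pvStepG gtp s).keys = (pvStepT tm s).keys := by
  have hcont : tm.contains s.1 = gtp.contains s.1 := by
    rw [PySem.Dict.contains_eq_decide_mem_keys, PySem.Dict.contains_eq_decide_mem_keys, hk]
  simp only [pvStepG, pvStepT, PySem.Dict.keys_modify]
  by_cases hc : gtp.contains s.1 = true
  · rw [PySem.Dict.keys_insert_of_contains _ _ hc,
      PySem.Dict.keys_insert_of_contains _ _ (hcont.trans hc), hk]
  · rw [PySem.Dict.keys_insert_of_not_contains _ _ (by simp [hc]),
      PySem.Dict.keys_insert_of_not_contains _ _ (by rw [hcont]; simp [hc]), hk]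

lemma A_step (gtp : PySem.Dict String Int) (tm : PySem.Dict String (List (Int × Int)))
    (s : String × (Int × Int)) (hk : gtp.keys = tm.keys) :
    (let st := if gtp.contains s.1 then (gtp, tm) else (gtp.insert s.1 0, tm.insert s.1 [])
     (st.1.modify s.1 0 (fun t => t + s.2.2),
      st.2.modify s.1 [] (fun l => l ++ [(s.2.1, -s.2.2)]))) = (pvStepG gtp s, pvStepT tm s) := by
  have hcont : tm.contains s.1 = gtp.contains s.1 := by
    rw [PySem.Dict.contains_eq_decide_mem_keys, PySem.Dict.contains_eq_decide_mem_keys, hk]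
  by_cases hc : gtp.contains s.1 = true
  · simp [hc, pvStepG, pvStepT]
  · have h1 : gtp.getD s.1 (0 : Int) = 0 :=
      PySem.Dict.getD_of_not_contains gtp _ (by simp [hc])
    have h2 : tm.getD s.1 ([] : List (Int × Int)) = [] :=
      PySem.Dict.getD_of_not_contains tm _ (by rw [hcont]; simp [hc])
    simp only [hc, Bool.false_eq_true, if_false, pvStepG, pvStepT, PySem.Dict.modify,
      PySem.Dict.getD_insert_self, PySem.Dict.insert_insert_self, h1, h2]

lemma A_pair_fold (S : List (String × (Int × Int)))
    (gtp : PySem.Dict String Int) (tm : PySem.Dict String (List (Int × Int)))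
    (hk : gtp.keys = tm.keys) :
    S.foldl
      (fun (st : PySem.Dict String Int × PySem.Dict String (List (Int × Int))) s =>
        let st := if st.1.contains s.1 then st else (st.1.insert s.1 0, st.2.insert s.1 [])
        (st.1.modify s.1 0 (fun t => t + s.2.2),
         st.2.modify s.1 [] (fun l => l ++ [(s.2.1, -s.2.2)]))) (gtp, tm)
      = (S.foldl pvStepG gtp, S.foldl pvStepT tm) := by
  induction S generalizing gtp tm with
  | nil => rfl
  | cons s S ih =>
    simp only [List.foldl_cons]
    rw [show (let st := if (gtp, tm).1.contains s.1 then (gtp, tm)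
          else ((gtp, tm).1.insert s.1 0, (gtp, tm).2.insert s.1 [])
        (st.1.modify s.1 0 (fun t => t + s.2.2),
         st.2.modify s.1 [] (fun l => l ++ [(s.2.1, -s.2.2)]))) = (pvStepG gtp s, pvStepT tm s)
      from A_step gtp tm s hk]
    exact ih _ _ (A_keys gtp tm s hk)

lemma B_step (d : PySem.Dict String (Int × List (Int × Int))) (s : String × (Int × Int)) :
    (let d' := if d.contains s.1 then d else d.insert s.1 (0, [])
     let e := d'.getD s.1 (0, [])
     d'.insert s.1 (e.1 + s.2.2, (altIns (s.2.1, s.2.2) e.2).take 2)) = pvStepB d s := by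
  by_cases hc : d.contains s.1 = true
  · simp [hc, pvStepB, PySem.Dict.modify]
  · have h0 : d.getD s.1 ((0 : Int), ([] : List (Int × Int))) = (0, []) :=
      PySem.Dict.getD_of_not_contains d _ (by simp [hc])
    simp only [hc, Bool.false_eq_true, if_false, pvStepB, PySem.Dict.modify, h0,
      PySem.Dict.getD_insert_self, PySem.Dict.insert_insert_self]

lemma central (S : List (String × (Int × Int))) (hp : S.Pairwise (fun a b => a.2.1 < b.2.1)) :
    ((PySem.List.sorted ((S.foldl pvStepG PySem.Dict.empty).items.map (fun gt => (-gt.2, gt.1)))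
        (fun x => x.1)).map (fun x => x.2)).flatMap
      (fun g => ((PySem.List.sorted2 ((S.foldl pvStepT PySem.Dict.empty).getD g [])
          (fun x => x.2) (fun x => x.1)).take 2).map (fun ip => ip.1))
    = (PySem.List.sorted (S.foldl pvStepB PySem.Dict.empty).items (fun kv => -kv.2.1)).flatMap
        (fun kv => kv.2.2.map (fun ip => ip.1)) := by
  set gtp := S.foldl pvStepG PySem.Dict.empty with hgtp
  set tm := S.foldl pvStepT PySem.Dict.empty with htm
  set info := S.foldl pvStepB PySem.Dict.empty with hinfo
  have hkG : gtp.keys = PySem.Set.update [] (S.map (fun s => s.1)) := by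
    rw [hgtp]
    simpa [pvStepG] using
      PySem.Dict.keys_foldl_modify_key S (fun s => s.1) (0 : Int)
        (fun _ s t => t + s.2.2) PySem.Dict.empty
  have hKT : tm.keys = gtp.keys := by
    rw [hkG, htm]
    simpa [pvStepT] using
      PySem.Dict.keys_foldl_modify_key S (fun s => s.1) ([] : List (Int × Int))
        (fun _ s l => l ++ [(s.2.1, -s.2.2)]) PySem.Dict.empty
  have hKB : info.keys = gtp.keys := by
    rw [hkG, hinfo]
    simpa [pvStepB] using
      PySem.Dict.keys_foldl_modify_key S (fun s => s.1) ((0 : Int), ([] : List (Int × Int)))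
        (fun _ s e => (e.1 + s.2.2, (altIns (s.2.1, s.2.2) e.2).take 2)) PySem.Dict.empty
  have hnd : gtp.keys.Nodup := by
    rw [hgtp]
    simpa [pvStepG] using
      PySem.Dict.nodup_keys_foldl_modify_key S (fun s => s.1) (0 : Int)
        (fun _ s t => t + s.2.2) PySem.Dict.empty (by simp)
  have hG : ∀ g, gtp.getD g 0 = (S.filter (fun s => s.1 == g)).foldl (fun v s => v + s.2.2) 0 := by
    intro g; rw [hgtp]
    simpa [pvStepG] using
      getD_foldl_modify_gen S (fun s => s.1) (0 : Int) (fun s t => t + s.2.2) PySem.Dict.empty g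
  have hT : ∀ g, tm.getD g [] = ((S.filter (fun s => s.1 == g)).map (fun s => s.2)).map pvNeg := by
    intro g; rw [htm]
    have h := getD_foldl_modify_gen S (fun s => s.1) ([] : List (Int × Int))
      (fun s l => l ++ [(s.2.1, -s.2.2)]) PySem.Dict.empty g
    rw [show (fun (d : PySem.Dict String (List (Int × Int))) (s : String × (Int × Int)) =>
        d.modify s.1 [] (fun l => l ++ [(s.2.1, -s.2.2)])) = pvStepT from rfl] at h
    have hm := PySem.List.foldl_append_singleton_eq_map
      (fun (s : String × (Int × Int)) => (((s.2.1 : Int), (-s.2.2 : Int)) : Int × Int))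
      (List.filter (fun s => s.1 == g) S) []
    rw [h, PySem.Dict.getD_empty, hm, List.map_map, List.nil_append]
    rfl
  have hB : ∀ g, info.getD g (0, []) =
      ((S.filter (fun s => s.1 == g)).foldl (fun v s => v + s.2.2) 0,
       ((S.filter (fun s => s.1 == g)).map (fun s => s.2)).foldl
         (fun t x => (altIns x t).take 2) []) := by
    intro g; rw [hinfo]
    have h := getD_foldl_modify_gen S (fun s => s.1) ((0 : Int), ([] : List (Int × Int)))
      (fun s e => (e.1 + s.2.2, (altIns (s.2.1, s.2.2) e.2).take 2)) PySem.Dict.empty g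
    rw [show (fun (d : PySem.Dict String (Int × List (Int × Int))) (s : String × (Int × Int)) =>
        d.modify s.1 (0, []) (fun e => (e.1 + s.2.2, (altIns (s.2.1, s.2.2) e.2).take 2)))
        = pvStepB from rfl] at h
    have hpm := PySem.List.foldl_prod_mk
      (fun (v : Int) (s : String × (Int × Int)) => v + s.2.2)
      (fun (t : List (Int × Int)) (s : String × (Int × Int)) => (altIns (s.2.1, s.2.2) t).take 2)
      (List.filter (fun s => s.1 == g) S) 0 []
    rw [h, PySem.Dict.getD_empty, hpm, List.foldl_map]
  have hItemsG : gtp.items = gtp.keys.map (fun g => (g, gtp.getD g 0)) :=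
    PySem.Dict.items_eq_map_keys gtp hnd 0
  have hItemsB : info.items = gtp.keys.map (fun g => (g, info.getD g (0, []))) := by
    rw [PySem.Dict.items_eq_map_keys info (by rw [hKB]; exact hnd) (0, []), hKB]
  rw [hItemsG, hItemsB, List.map_map, sorted_map_key, sorted_map_key, List.map_map,
    List.flatMap_map, List.flatMap_map]
  have hkey : (fun g => (fun (kv : String × (Int × List (Int × Int))) => -kv.2.1)
      ((fun g => (g, info.getD g (0, []))) g)) =
      (fun g => (fun (x : Int × String) => x.1) (((fun gt : String × Int => (-gt.2, gt.1)) ∘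
        (fun g => (g, gtp.getD g 0))) g)) := by
    funext g; simp only [Function.comp]; rw [hB, hG]
  rw [hkey]
  congr 1
  funext g
  simp only [Function.comp]
  rw [hT g, hB g, top2_core _ (by
    refine List.pairwise_map.mpr ?_
    exact List.Pairwise.filter _ hp), List.map_map, List.map_map]
  rfl

def pvS (genres : List String) (plays : List Int) : List (String × (Int × Int)) :=
  (PySem.List.enumerate (genres.zip plays)).map (fun x => (x.2.1, (x.1, x.2.2)))

lemma pvS_pairwise (genres : List String) (plays : List Int) :
    (pvS genres plays).Pairwise (fun a b => a.2.1 < b.2.1) := by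
  unfold pvS
  exact List.pairwise_map.mpr (PySem.List.pairwise_lt_enumerate _ _)

lemma alt_eq (genres : List String) (plays : List Int) :
    solution_alt genres plays =
      (PySem.List.sorted ((pvS genres plays).foldl pvStepB PySem.Dict.empty).items
        (fun kv => -kv.2.1)).flatMap (fun kv => kv.2.2.map (fun ip => ip.1)) := by
  unfold solution_alt pvS
  rw [List.foldl_map]
  have hfn : (fun (info : PySem.Dict String (Int × List (Int × Int))) (s : Int × (String × Int)) =>
      let info' := if info.contains s.2.1 then info else info.insert s.2.1 (0, [])
      let e := info'.getD s.2.1 (0, [])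
      info'.insert s.2.1 (e.1 + s.2.2, (altIns (s.1, s.2.2) e.2).take 2))
      = (fun (info : PySem.Dict String (Int × List (Int × Int))) (x : Int × (String × Int)) =>
          pvStepB info (x.2.1, (x.1, x.2.2))) :=
    funext fun d => funext fun x => B_step d (x.2.1, (x.1, x.2.2))
  rw [hfn]

lemma pvS_eq (genres : List String) (plays : List Int) (hpre : genres.length ≤ plays.length) :
    (PySem.List.enumerate genres).map
        (fun jg => ((jg.2 : String), ((jg.1 : Int), PySem.List.pyGetD plays jg.1 0)))
      = pvS genres plays := by
  unfold pvS
  apply List.ext_getElem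
  · simp [PySem.List.length_enumerate, List.length_zip]
    omega
  · intro k h1 h2
    have hkg : k < genres.length := by
      simpa [PySem.List.length_enumerate] using h1
    have hkz : k < (genres.zip plays).length := by
      simp [List.length_zip]; omega
    have hkp : k < plays.length := by omega
    simp only [List.getElem_map, PySem.List.getElem_enumerate, List.getElem_zip]
    have hg : PySem.List.pyGetD plays ((0 : Int) + (k : Int)) 0 = plays[k] := by
      rw [zero_add, PySem.List.pyGetD_natCast, List.getD_eq_getElem _ _ hkp]
    rw [hg]

lemma a_eq (genres : List String) (plays : List Int) (hpre : genres.length ≤ plays.length) :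
    solution genres plays =
      ((PySem.List.sorted (((pvS genres plays).foldl pvStepG PySem.Dict.empty).items.map
          (fun gt => (-gt.2, gt.1))) (fun x => x.1)).map (fun x => x.2)).flatMap
        (fun g => ((PySem.List.sorted2 (((pvS genres plays).foldl pvStepT PySem.Dict.empty).getD g [])
            (fun x => x.2) (fun x => x.1)).take 2).map (fun ip => ip.1)) := by
  have hST : (PySem.List.pyRange 0 (PySem.List.len genres) 1).foldl
      (fun (st : PySem.Dict String Int × PySem.Dict String (List (Int × Int))) i =>
        let genre := PySem.List.pyGetD genres i ""
        let st := if st.1.contains genre then st else (st.1.insert genre 0, st.2.insert genre [])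
        (st.1.modify genre 0 (fun t => t + PySem.List.pyGetD plays i 0),
         st.2.modify genre [] (fun l => l ++ [(i, -(PySem.List.pyGetD plays i 0))])))
      (PySem.Dict.empty, PySem.Dict.empty)
      = ((pvS genres plays).foldl pvStepG PySem.Dict.empty,
         (pvS genres plays).foldl pvStepT PySem.Dict.empty) := by
    rw [← A_pair_fold _ _ _ (by simp)]
    have hpr : PySem.List.pyRange 0 (PySem.List.len genres) 1
        = (PySem.List.enumerate genres).map (fun jg => jg.1) := by
      rw [PySem.List.map_fst_enumerate genres 0]
      norm_num [PySem.List.len]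
    rw [hpr, List.foldl_map, ← pvS_eq genres plays hpre, List.foldl_map]
    apply PySem.List.foldl_congr_mem
    intro acc x hx
    obtain ⟨k, hk, rfl⟩ := (PySem.List.mem_enumerate_iff genres 0 x).mp hx
    have hg : PySem.List.pyGetD genres ((0 : Int) + (k : Int)) "" = genres[k] := by
      rw [zero_add, PySem.List.pyGetD_natCast, List.getD_eq_getElem _ _ hk]
    simp only [hg]
  unfold solution
  rw [hST]
  simp only [takeLoop_zero, PySem.List.foldl_append_singleton_eq_map,
    PySem.List.foldl_append_eq_flatMap, List.nil_append]

-- ===== VERDICT (by name: the statement is the Claim_ definition above) =====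
theorem solution_spec : Claim_equal_solution := by
  intro genres plays _ hpre
  show solution genres plays = solution_alt genres plays
  rw [a_eq genres plays hpre, alt_eq genres plays]
  exact central _ (pvS_pairwise genres plays)
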